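-- pv_equiv track=rewrite | github.com/c0pperdragon/BreadBin | tools/asm.py | tokenize
-- ===== SOURCE A (Python) =====
-- def findany(str, patterns):
--     first = -1
--     for p in patterns:
--         pos = str.find(p)
--         if pos>=0 and (first<0 or pos<first):
--             first = pos
--     return first
--
-- def tokenize(line):
--     # strip comments and uppercase everything
--     comment = line.find(";")
--     if comment>=0:
--         line = line[0:comment]
--     # uppercase everything - rely on pythons definiton of "upper"
--     line = line.upper()
--     # break appart on white space and additionally seperate out ':' or '='
--     tokens = []
--     for token in line.split():
--         first = findany(token, [":","="])
--         if first>=0: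
--             if first>0:
--                 tokens.append(token[:first])
--             tokens.append(token[first:first+1])
--             if first<len(token)-1:
--                 tokens.append(token[first+1:])
--         else:
--             tokens.append(token)
--     return tokens
-- ===== SOURCE B (Python) =====
-- def tokenize(line):
--     # one combined pass: stop at ';', uppercase per char, split on whitespace
--     # and split out the first ':' or '=' of each whitespace-delimited segment
--     tokens = []
--     buf = ""
--     split_done = False
--     for c in line:
--         if c == ';':
--             break
--         c = c.upper()
--         if c.isspace():
--             if buf:
--                 tokens.append(buf)
--             buf = ""
--             split_done = False
--         elif (c == ':' or c == '=') and not split_done: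
--             if buf:
--                 tokens.append(buf)
--             tokens.append(c)
--             buf = ""
--             split_done = True
--         else:
--             buf += c
--     if buf:
--         tokens.append(buf)
--     return tokens
-- ===== Notes on version B (the rewrite author's own statement) =====
-- stated objective: faster
-- what changed: Replaces A's strip/upper/split pipeline plus a per-token findany-and-three-slices pass with one combined character-by-character scan that stops at ';', uppercases inline and emits tokens via a buffer and a per-segment split_done flag.
import Mathlib
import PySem

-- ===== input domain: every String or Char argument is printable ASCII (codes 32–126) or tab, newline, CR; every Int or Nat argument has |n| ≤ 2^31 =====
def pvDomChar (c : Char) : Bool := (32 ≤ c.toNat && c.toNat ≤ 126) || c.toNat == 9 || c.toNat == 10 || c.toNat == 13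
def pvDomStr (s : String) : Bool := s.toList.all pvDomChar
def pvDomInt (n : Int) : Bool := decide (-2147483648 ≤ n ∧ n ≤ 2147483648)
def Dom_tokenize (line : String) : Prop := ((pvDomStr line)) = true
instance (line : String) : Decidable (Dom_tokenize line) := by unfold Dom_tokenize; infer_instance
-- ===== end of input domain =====

-- B replaces A's strip/upper/split pipeline with one combined character scan (constant-factor speedup, one pass).

-- ===== PORT A =====
def findany (s : String) (patterns : List String) : Int :=
  patterns.foldl (fun first p =>
    let pos := PySem.Str.find s p
    if 0 ≤ pos ∧ (first < 0 ∨ pos < first) then pos else first) (-1)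

def tokenize (line : String) : List String :=
  let comment := PySem.Str.find line ";"
  let line := if 0 ≤ comment then PySem.Str.slice line (some 0) (some comment) else line
  let line := PySem.Str.upper line
  (PySem.Str.split₀ line).foldl (fun tokens token =>
    let first := findany token [":", "="]
    if 0 ≤ first then
      let tokens := if 0 < first then tokens ++ [PySem.Str.slice token none (some first)] else tokens
      let tokens := tokens ++ [PySem.Str.slice token (some first) (some (first + 1))]
      if first < PySem.Str.len token - 1 then tokens ++ [PySem.Str.slice token (some (first + 1)) none]
      else tokens
    else tokens ++ [token]) []

-- ===== PORT B =====
def bscan : List Char → List String → List Char → Bool → List String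
  | [], tokens, buf, _ => if buf.isEmpty then tokens else tokens ++ [String.ofList buf]
  | c :: cs, tokens, buf, sd =>
    if c = ';' then (if buf.isEmpty then tokens else tokens ++ [String.ofList buf])
    else
      let u := PySem.Chars.upperChar c
      if PySem.Chars.isspace u then
        bscan cs (if buf.isEmpty then tokens else tokens ++ [String.ofList buf]) [] false
      else if (u = ':' ∨ u = '=') ∧ sd = false then
        bscan cs ((if buf.isEmpty then tokens else tokens ++ [String.ofList buf]) ++ [String.ofList [u]]) [] true
      else bscan cs tokens (buf ++ [u]) sd

def tokenize_alt (line : String) : List String := bscan line.toList [] [] false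

-- ===== PRECONDITION & SPEC =====
def Spec_tokenize (line : String) (out : List String) : Prop := out = tokenize_alt line
instance (line : String) (out : List String) : Decidable (Spec_tokenize line out) := by unfold Spec_tokenize; infer_instance

-- ===== CLAIM (what is proved, stated in full; the proofs are below) =====
def Claim_equal_tokenize : Prop := ∀ (line : String), Dom_tokenize line → Spec_tokenize line (tokenize line)

-- ===== LEMMAS AND PROOFS =====

-- per-token result of A's loop body
def splitTok (token : String) : List String :=
  let first := findany token [":", "="]
  if 0 ≤ first then
    (if 0 < first then [PySem.Str.slice token none (some first)] else []) ++
      [PySem.Str.slice token (some first) (some (first + 1))] ++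
      (if first < PySem.Str.len token - 1 then [PySem.Str.slice token (some (first + 1)) none] else [])
  else [token]

-- whitespace split, forward accumulator form
def wgo : List Char → List Char → List (List Char)
  | [], cur => if cur = [] then [] else [cur]
  | c :: cs, cur =>
    if PySem.Chars.isspace c then (if cur = [] then [] else [cur]) ++ wgo cs []
    else wgo cs (cur ++ [c])

-- B's scan after the ';'-cut and uppercasing have been pulled out
def scan2 : List Char → List String → List Char → Bool → List String
  | [], tokens, buf, _ => if buf = [] then tokens else tokens ++ [String.ofList buf]
  | c :: cs, tokens, buf, sd =>
    if PySem.Chars.isspace c then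
      scan2 cs (if buf = [] then tokens else tokens ++ [String.ofList buf]) [] false
    else if (c = ':' ∨ c = '=') ∧ sd = false then
      scan2 cs ((if buf = [] then tokens else tokens ++ [String.ofList buf]) ++ [String.ofList [c]]) [] true
    else scan2 cs tokens (buf ++ [c]) sd

def seg (buf : List Char) : List String := if buf = [] then [] else [String.ofList buf]

def NoDelim (l : List Char) : Prop := ∀ x ∈ l, x ≠ ':' ∧ x ≠ '='

def normTok (l : List Char) : List String :=
  (wgo (List.map PySem.Chars.upperChar (l.takeWhile (fun c => decide (c ≠ ';')))) []).flatMap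
    (fun t => splitTok (String.ofList t))

lemma body_eq : (fun (tokens : List String) (token : String) =>
    let first := findany token [":", "="]
    if 0 ≤ first then
      let tokens := if 0 < first then tokens ++ [PySem.Str.slice token none (some first)] else tokens
      let tokens := tokens ++ [PySem.Str.slice token (some first) (some (first + 1))]
      if first < PySem.Str.len token - 1 then tokens ++ [PySem.Str.slice token (some (first + 1)) none]
      else tokens
    else tokens ++ [token]) = fun tokens token => tokens ++ splitTok token := by
  funext tokens token
  simp only [splitTok]
  split_ifs <;> simp [List.append_assoc]

lemma prefix_single_iff (c : Char) (xs : List Char) : ([c] <+: xs) ↔ xs.head? = some c := by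
  cases xs with
  | nil => simp
  | cons b t => simp [List.cons_prefix_cons, eq_comm]

lemma singleton_infix_of_mem {c : Char} {l : List Char} (h : c ∈ l) : [c] <:+: l := by
  obtain ⟨s, t, rfl⟩ := List.append_of_mem h
  exact ⟨s, t, by simp⟩

lemma find_single_not_mem (l : List Char) (c : Char) (h : c ∉ l) : PySem.Chars.find l [c] = -1 := by
  rw [PySem.Chars.find_eq_neg_one_iff]
  intro hinf
  exact h (hinf.sublist.subset (by simp))

lemma find_single_at (buf rest : List Char) (c : Char) (h : c ∉ buf) :
    PySem.Chars.find (buf ++ c :: rest) [c] = buf.length := by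
  have hinf : [c] <:+: buf ++ c :: rest := singleton_infix_of_mem (by simp)
  have h0 : 0 ≤ PySem.Chars.find (buf ++ c :: rest) [c] := (PySem.Chars.find_nonneg_iff _ _).2 hinf
  obtain ⟨hpre, hmin⟩ := PySem.Chars.find_spec h0
  set n := (PySem.Chars.find (buf ++ c :: rest) [c]).toNat with hn
  have hgetn : (buf ++ c :: rest)[n]? = some c := by
    rw [← List.head?_drop]; exact (prefix_single_iff _ _).1 hpre
  have hne : n = buf.length := by
    rcases lt_trichotomy n buf.length with hlt | heq | hgt
    · exfalso
      have hb : buf[n]? = some c := by rwa [List.getElem?_append_left hlt] at hgetn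
      exact h (List.mem_of_getElem? hb)
    · exact heq
    · exfalso
      apply hmin buf.length hgt
      rw [prefix_single_iff, List.head?_drop, List.getElem?_append_right (le_refl _)]
      simp
  omega

lemma find_single_lb (buf rest : List Char) (c d : Char) (hd : d ∉ buf) (hne : c ≠ d) :
    PySem.Chars.find (buf ++ c :: rest) [d] = -1 ∨
      (buf.length : Int) < PySem.Chars.find (buf ++ c :: rest) [d] := by
  by_cases h0 : 0 ≤ PySem.Chars.find (buf ++ c :: rest) [d]
  case neg =>
    left
    have := PySem.Chars.neg_one_le_find (buf ++ c :: rest) [d]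
    omega
  case pos =>
    right
    obtain ⟨hpre, -⟩ := PySem.Chars.find_spec h0
    set n := (PySem.Chars.find (buf ++ c :: rest) [d]).toNat with hn
    have hgetn : (buf ++ c :: rest)[n]? = some d := by
      rw [← List.head?_drop]; exact (prefix_single_iff _ _).1 hpre
    have hgt : buf.length < n := by
      rcases lt_trichotomy n buf.length with hlt | heq | hgt
      · exfalso
        have hb : buf[n]? = some d := by rwa [List.getElem?_append_left hlt] at hgetn
        exact hd (List.mem_of_getElem? hb)
      · exfalso
        rw [heq, List.getElem?_append_right (le_refl _)] at hgetn
        simp at hgetn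
        exact hne hgetn
      · exact hgt
    omega

lemma splitTok_nodelim (t : List Char) (h : NoDelim t) :
    splitTok (String.ofList t) = [String.ofList t] := by
  have h1 : PySem.Chars.find t [':'] = -1 := find_single_not_mem t ':' (fun hm => (h _ hm).1 rfl)
  have h2 : PySem.Chars.find t ['='] = -1 := find_single_not_mem t '=' (fun hm => (h _ hm).2 rfl)
  have hc1 : ((":" : String)).toList = [':'] := by decide
  have hc2 : (("=" : String)).toList = ['='] := by decide
  simp [splitTok, findany, PySem.Str.find, hc1, hc2, h1, h2]

lemma splitTok_delim (buf rest : List Char) (c : Char) (h : NoDelim buf) (hc : c = ':' ∨ c = '=') :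
    splitTok (String.ofList (buf ++ c :: rest)) =
      seg buf ++ [String.ofList [c]] ++ seg rest := by
  have hc1 : ((":" : String)).toList = [':'] := by decide
  have hc2 : (("=" : String)).toList = ['='] := by decide
  have hfa : findany (String.ofList (buf ++ c :: rest)) [":", "="] = (buf.length : Int) := by
    rcases hc with rfl | rfl
    · have h1 := find_single_at buf rest ':' (fun hm => (h _ hm).1 rfl)
      have h2 := find_single_lb buf rest ':' '=' (fun hm => (h _ hm).2 rfl) (by decide)
      simp only [findany, List.foldl_cons, List.foldl_nil, PySem.Str.find, String.toList_ofList,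
        hc1, hc2, h1]
      rcases h2 with h2 | h2 <;> split_ifs <;> omega
    · have h1 := find_single_at buf rest '=' (fun hm => (h _ hm).2 rfl)
      have h2 := find_single_lb buf rest '=' ':' (fun hm => (h _ hm).1 rfl) (by decide)
      simp only [findany, List.foldl_cons, List.foldl_nil, PySem.Str.find, String.toList_ofList,
        hc1, hc2, h1]
      rcases h2 with h2 | h2 <;> split_ifs <;> omega
  have hsplit : buf ++ c :: rest = (buf ++ [c]) ++ rest := by simp
  have hone : PySem.Str.slice (String.ofList (buf ++ c :: rest)) (some (buf.length : Int))
      (some ((buf.length : Int) + 1)) = String.ofList [c] := by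
    have hcast : ((buf.length : Int) + 1) = (((buf.length + 1 : Nat)) : Int) := by push_cast; ring
    rw [hcast]
    simp only [PySem.Str.slice, String.toList_ofList, PySem.Chars.slice_eq_listSlice,
      PySem.List.slice_natCast, List.drop_left]
    simp
  have hp : PySem.Str.slice (String.ofList (buf ++ c :: rest)) none (some (buf.length : Int))
      = String.ofList buf := by
    simp only [PySem.Str.slice, String.toList_ofList, PySem.Chars.slice_eq_listSlice,
      PySem.List.slice_to_natCast, List.take_left]
  have hsuf : PySem.Str.slice (String.ofList (buf ++ c :: rest)) (some ((buf.length : Int) + 1)) none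
      = String.ofList rest := by
    have hcast : ((buf.length : Int) + 1) = (((buf ++ [c]).length : Nat) : Int) := by simp
    rw [hcast]
    simp only [PySem.Str.slice, String.toList_ofList, PySem.Chars.slice_eq_listSlice,
      PySem.List.slice_from_natCast]
    rw [hsplit, List.drop_left]
  have hlen : PySem.Str.len (String.ofList (buf ++ c :: rest))
      = (buf.length : Int) + 1 + (rest.length : Int) := by
    simp [PySem.Str.len]
    ring
  have h1iff : ((0 : Int) < (buf.length : Int)) ↔ buf ≠ [] := by
    cases buf with
    | nil => simp
    | cons x xs =>
      simp only [List.length_cons, ne_eq]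
      constructor
      · intro _ hh
        exact List.cons_ne_nil x xs hh
      · intro _
        push_cast
        omega
  have h3iff : ((buf.length : Int) < (buf.length : Int) + 1 + (rest.length : Int) - 1) ↔ rest ≠ [] := by
    cases rest with
    | nil => simp
    | cons x xs =>
      simp only [List.length_cons, ne_eq]
      constructor
      · intro _ hh
        exact List.cons_ne_nil x xs hh
      · intro _
        push_cast
        omega
  simp only [splitTok, hfa, hlen]
  rw [if_pos (Int.natCast_nonneg _), hone]
  have e1 : (if (0 : Int) < (buf.length : Int) then
        [PySem.Str.slice (String.ofList (buf ++ c :: rest)) none (some (buf.length : Int))]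
      else []) = seg buf := by
    by_cases hb : buf = []
    · rw [if_neg (fun hh => h1iff.1 hh hb), hb]
      simp [seg]
    · rw [if_pos (h1iff.2 hb), hp]
      simp [seg, hb]
  have e3 : (if (buf.length : Int) < (buf.length : Int) + 1 + (rest.length : Int) - 1 then
        [PySem.Str.slice (String.ofList (buf ++ c :: rest)) (some ((buf.length : Int) + 1)) none]
      else []) = seg rest := by
    by_cases hr : rest = []
    · rw [if_neg (fun hh => h3iff.1 hh hr), hr]
      simp [seg]
    · rw [if_pos (h3iff.2 hr), hsuf]
      simp [seg, hr]
  rw [e1, e3]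

lemma take_eq_takeWhile_aux : ∀ (l : List Char) (n : Nat),
    (∀ i, i < n → l[i]? ≠ some ';') → l[n]? = some ';' →
    l.take n = l.takeWhile (fun c => decide (c ≠ ';')) := by
  intro l
  induction l with
  | nil =>
    intro n _ h2
    simp at h2
  | cons a t ih =>
    intro n h1 h2
    cases n with
    | zero =>
      simp only [List.getElem?_cons_zero, Option.some_inj] at h2
      simp [h2]
    | succ m =>
      have ha : a ≠ ';' := by
        have := h1 0 (Nat.succ_pos m)
        simpa using this
      simp only [List.take_succ_cons, List.takeWhile_cons, ha, decide_true, ne_eq,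
        not_false_eq_true, if_true]
      rw [ih m (fun i hi => by simpa using h1 (i + 1) (by omega)) (by simpa using h2)]

lemma strip_eq (l : List Char) :
    (if (0:Int) ≤ PySem.Chars.find l [';'] then l.take (PySem.Chars.find l [';']).toNat else l) =
      l.takeWhile (fun c => decide (c ≠ ';')) := by
  by_cases h : [';'] <:+: l
  · have h0 : 0 ≤ PySem.Chars.find l [';'] := (PySem.Chars.find_nonneg_iff _ _).2 h
    rw [if_pos h0]
    obtain ⟨hpre, hmin⟩ := PySem.Chars.find_spec h0
    apply take_eq_takeWhile_aux
    · intro i hi hcontra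
      exact hmin i hi ((prefix_single_iff _ _).2 (by rw [List.head?_drop]; exact hcontra))
    · rw [← List.head?_drop]
      exact (prefix_single_iff _ _).1 hpre
  · have h1 : PySem.Chars.find l [';'] = -1 := (PySem.Chars.find_eq_neg_one_iff _ _).2 h
    rw [h1, if_neg (by omega)]
    symm
    rw [List.takeWhile_eq_self_iff]
    intro x hx
    simp only [decide_eq_true_eq]
    rintro rfl
    exact h (singleton_infix_of_mem hx)

lemma split₀_go_eq : ∀ (cs cur : List Char) (accl : List (List Char)),
    PySem.Chars.split₀.go cs cur accl = accl.reverse ++ wgo cs cur.reverse := by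
  intro cs
  induction cs with
  | nil =>
    intro cur accl
    by_cases hcur : cur = [] <;>
      simp [PySem.Chars.split₀.go, wgo, hcur, List.isEmpty_iff]
  | cons c rest ih =>
    intro cur accl
    by_cases hs : PySem.Chars.isspace c
    · by_cases hcur : cur = []
      · subst hcur
        simp [PySem.Chars.split₀.go, wgo, hs, ih]
      · simp [PySem.Chars.split₀.go, wgo, hs, hcur, List.isEmpty_iff, ih]
    · simp [PySem.Chars.split₀.go, wgo, hs, ih]

lemma split₀_eq (cs : List Char) : PySem.Chars.split₀ cs = wgo cs [] := by
  rw [PySem.Chars.split₀, split₀_go_eq]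
  simp

lemma wgo_eq : ∀ (cs cur : List Char),
    wgo cs cur =
      (if cur ++ cs.takeWhile (fun c => !PySem.Chars.isspace c) = [] then []
       else [cur ++ cs.takeWhile (fun c => !PySem.Chars.isspace c)]) ++
        wgo (cs.dropWhile (fun c => !PySem.Chars.isspace c)) [] := by
  intro cs
  induction cs with
  | nil =>
    intro cur
    simp [wgo]
  | cons c rest ih =>
    intro cur
    by_cases hs : PySem.Chars.isspace c
    · simp [wgo, hs]
    · rw [show wgo (c :: rest) cur = wgo rest (cur ++ [c]) from by simp [wgo, hs]]
      rw [ih (cur ++ [c])]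
      simp [hs]

lemma flush_eq (tokens : List String) (buf : List Char) :
    (if buf = [] then tokens else tokens ++ [String.ofList buf]) = tokens ++ seg buf := by
  by_cases hb : buf = [] <;> simp [seg, hb]

lemma scan2_spec : ∀ cs : List Char,
    (∀ tokens buf, NoDelim buf →
      scan2 cs tokens buf false =
        tokens ++ (wgo cs buf).flatMap (fun t => splitTok (String.ofList t))) ∧
    (∀ tokens buf,
      scan2 cs tokens buf true =
        tokens ++ seg (buf ++ cs.takeWhile (fun c => !PySem.Chars.isspace c)) ++
          (wgo (cs.dropWhile (fun c => !PySem.Chars.isspace c)) []).flatMap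
            (fun t => splitTok (String.ofList t))) := by
  intro cs
  induction cs with
  | nil =>
    constructor
    · intro tokens buf hnd
      rw [show scan2 [] tokens buf false = tokens ++ seg buf from flush_eq tokens buf]
      by_cases hb : buf = [] <;> simp [wgo, seg, hb, splitTok_nodelim buf hnd]
    · intro tokens buf
      rw [show scan2 [] tokens buf true = tokens ++ seg buf from flush_eq tokens buf]
      simp [wgo, seg]
  | cons c rest ih =>
    obtain ⟨ih1, ih2⟩ := ih
    constructor
    · intro tokens buf hnd
      by_cases hs : PySem.Chars.isspace c
      · rw [show scan2 (c :: rest) tokens buf false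
              = scan2 rest (if buf = [] then tokens else tokens ++ [String.ofList buf]) [] false
            from by simp [scan2, hs]]
        rw [ih1 _ [] (by intro x hx; simp at hx), flush_eq]
        rw [show wgo (c :: rest) buf = (if buf = [] then [] else [buf]) ++ wgo rest [] from by
          simp [wgo, hs]]
        by_cases hb : buf = [] <;>
          simp [hb, seg, splitTok_nodelim buf hnd, List.append_assoc]
      · by_cases hd : (c = ':' ∨ c = '=')
        · rw [show scan2 (c :: rest) tokens buf false
                = scan2 rest ((if buf = [] then tokens else tokens ++ [String.ofList buf])
                    ++ [String.ofList [c]]) [] true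
              from by simp [scan2, hs, hd]]
          rw [ih2, flush_eq]
          rw [show wgo (c :: rest) buf = wgo rest (buf ++ [c]) from by simp [wgo, hs]]
          rw [wgo_eq rest (buf ++ [c])]
          rw [show (buf ++ [c]) ++ rest.takeWhile (fun c => !PySem.Chars.isspace c)
                = buf ++ c :: rest.takeWhile (fun c => !PySem.Chars.isspace c) from by simp]
          rw [if_neg (by simp)]
          simp only [List.flatMap_cons, List.singleton_append]
          rw [splitTok_delim buf _ c hnd hd]
          simp [seg, List.append_assoc]
        · obtain ⟨hd1, hd2⟩ := not_or.mp hd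
          rw [show scan2 (c :: rest) tokens buf false = scan2 rest tokens (buf ++ [c]) false
              from by simp [scan2, hs, hd1, hd2]]
          rw [ih1 tokens (buf ++ [c]) (by
            intro x hx
            rcases List.mem_append.1 hx with hx | hx
            · exact hnd x hx
            · simp at hx
              subst hx
              exact ⟨hd1, hd2⟩)]
          rw [show wgo (c :: rest) buf = wgo rest (buf ++ [c]) from by simp [wgo, hs]]
    · intro tokens buf
      by_cases hs : PySem.Chars.isspace c
      · rw [show scan2 (c :: rest) tokens buf true
              = scan2 rest (if buf = [] then tokens else tokens ++ [String.ofList buf]) [] false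
            from by simp [scan2, hs]]
        rw [ih1 _ [] (by intro x hx; simp at hx), flush_eq]
        simp [hs, wgo, List.append_assoc]
      · rw [show scan2 (c :: rest) tokens buf true = scan2 rest tokens (buf ++ [c]) true
            from by simp [scan2, hs]]
        rw [ih2 tokens (buf ++ [c])]
        simp [hs, List.append_assoc]

lemma bscan_eq : ∀ (cs : List Char) (tokens : List String) (buf : List Char) (sd : Bool),
    bscan cs tokens buf sd =
      scan2 ((cs.takeWhile (fun c => decide (c ≠ ';'))).map PySem.Chars.upperChar) tokens buf sd := by
  intro cs
  induction cs with
  | nil =>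
    intro tokens buf sd
    simp [bscan, scan2, List.isEmpty_iff]
  | cons c rest ih =>
    intro tokens buf sd
    by_cases hsemi : c = ';'
    · subst hsemi
      simp [bscan, scan2, List.isEmpty_iff]
    · rw [show (c :: rest).takeWhile (fun c => decide (c ≠ ';'))
            = c :: rest.takeWhile (fun c => decide (c ≠ ';')) from by simp [hsemi]]
      rw [List.map_cons]
      by_cases hs : PySem.Chars.isspace (PySem.Chars.upperChar c)
      · simp [bscan, scan2, hsemi, hs, ih, List.isEmpty_iff]
      · by_cases hd : (PySem.Chars.upperChar c = ':' ∨ PySem.Chars.upperChar c = '=') ∧ sd = false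
        · simp [bscan, scan2, hsemi, hs, hd, ih, List.isEmpty_iff]
        · simp [bscan, scan2, hsemi, hs, hd, ih]

lemma A_norm (line : String) : tokenize line = normTok line.toList := by
  rw [tokenize, body_eq, PySem.List.foldl_append_eq_flatMap, List.nil_append]
  have hsemi : ((";" : String)).toList = [';'] := by decide
  have hstr : (PySem.Str.upper (if 0 ≤ PySem.Str.find line ";" then
        PySem.Str.slice line (some 0) (some (PySem.Str.find line ";")) else line)).toList
      = List.map PySem.Chars.upperChar ((line.toList).takeWhile (fun c => decide (c ≠ ';'))) := by
    rw [PySem.Str.toList_upper]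
    have hfind : PySem.Str.find line ";" = PySem.Chars.find line.toList [';'] := by
      rw [PySem.Str.find_eq, hsemi]
    have hin : (if 0 ≤ PySem.Str.find line ";" then
          PySem.Str.slice line (some 0) (some (PySem.Str.find line ";")) else line).toList
        = (line.toList).takeWhile (fun c => decide (c ≠ ';')) := by
      rw [← strip_eq line.toList]
      by_cases h0 : 0 ≤ PySem.Str.find line ";"
      · rw [if_pos h0, if_pos (by rwa [hfind] at h0)]
        rw [PySem.Str.toList_slice]
        simp only [PySem.Chars.slice_eq_listSlice, PySem.List.slice_zero_start]
        rw [hfind, PySem.List.slice_to _ (by rwa [hfind] at h0)]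
      · rw [if_neg h0, if_neg (by rwa [hfind] at h0)]
    rw [hin]
    simp [PySem.Chars.upper]
  rw [PySem.Str.split₀, hstr, split₀_eq, normTok]
  rw [List.flatMap_map]

lemma B_norm (line : String) : tokenize_alt line = normTok line.toList := by
  rw [tokenize_alt, bscan_eq]
  have := (scan2_spec ((line.toList.takeWhile (fun c => decide (c ≠ ';'))).map
    PySem.Chars.upperChar)).1 [] [] (by intro x hx; simp at hx)
  rw [this, List.nil_append, normTok]

-- ===== VERDICT (by name: the statement is the Claim_ definition above) =====
theorem tokenize_spec : Claim_equal_tokenize := by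
  intro line _
  unfold Spec_tokenize
  rw [A_norm, B_norm]
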